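-- pv_equiv track=rewrite | github.com/karimuzman/Class_Exercises-Python-Intermediate | Exercises-Class04.py | move_not_sorted
-- ===== SOURCE A (Python) =====
-- def move_not_sorted(lst):
--     new_list = []
--     i = 1
--     while i < len(lst):
--         if lst[i - 1] > lst[i]:
--             new_list.append(lst.pop(i))
--         else:
--             i += 1
--     return new_list
-- ===== SOURCE B (Python) =====
-- def move_not_sorted(lst):
--     removed = []
--     kept = []
--     for x in lst:
--         if kept and kept[-1] > x:
--             removed.append(x)
--         else:
--             kept.append(x)
--     lst[:] = kept  # same in-place effect as A, which pops the removed items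
--     return removed
-- ===== Notes on version B (the rewrite author's own statement) =====
-- stated objective: faster
-- what changed: Replaces the while-loop with repeated O(n) list.pop(i) by a single forward pass that splits elements into kept/removed against the last kept value, then writes the kept elements back in one slice assignment.
import Mathlib
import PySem

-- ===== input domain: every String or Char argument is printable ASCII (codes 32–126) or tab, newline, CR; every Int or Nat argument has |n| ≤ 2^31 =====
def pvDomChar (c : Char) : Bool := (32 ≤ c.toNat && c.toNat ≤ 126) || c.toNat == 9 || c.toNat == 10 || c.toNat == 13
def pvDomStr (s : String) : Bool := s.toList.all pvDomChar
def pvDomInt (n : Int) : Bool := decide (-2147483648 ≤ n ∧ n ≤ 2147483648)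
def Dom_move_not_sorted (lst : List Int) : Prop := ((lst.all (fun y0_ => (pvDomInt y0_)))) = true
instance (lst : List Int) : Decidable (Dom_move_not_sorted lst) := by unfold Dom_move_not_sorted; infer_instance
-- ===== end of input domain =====

-- B replaces A's while-loop with repeated list.pop(i) by a single forward pass
-- splitting elements into kept/removed against the last kept value (asymptotically faster);
-- both Pythons mutate `lst` to the same kept elements, equivalence here is about the return value.


-- ===== PORT A =====
-- while i < len(lst): if lst[i-1] > lst[i]: new_list.append(lst.pop(i)) else: i += 1
-- state = (current lst, i, new_list); pop(i) = eraseIdx i; indices are in range whenever read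
def goA (lst : List Int) (i : Nat) (acc : List Int) : List Int :=
  if _h : i < lst.length then
    if lst.getD (i - 1) 0 > lst.getD i 0 then
      goA (lst.eraseIdx i) i (acc ++ [lst.getD i 0])
    else
      goA lst (i + 1) acc
  else acc
termination_by lst.length - i
decreasing_by
  · have := List.length_eraseIdx_of_lt (l := lst) (i := i) _h; omega
  · omega

def move_not_sorted (lst : List Int) : List Int := goA lst 1 []

-- ===== PORT B =====
-- for x in lst: if kept and kept[-1] > x: removed.append(x) else: kept.append(x); return removed
def goB (xs : List Int) (kept removed : List Int) : List Int :=
  match xs with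
  | [] => removed
  | x :: rest =>
    match kept.getLast? with
    | some k =>
      if k > x then goB rest kept (removed ++ [x])
      else goB rest (kept ++ [x]) removed
    | none => goB rest (kept ++ [x]) removed

def move_not_sorted_alt (lst : List Int) : List Int := goB lst [] []

-- ===== PRECONDITION & SPEC =====
def Spec_move_not_sorted (lst : List Int) (out : List Int) : Prop := out = move_not_sorted_alt lst
instance (lst : List Int) (out : List Int) : Decidable (Spec_move_not_sorted lst out) := by unfold Spec_move_not_sorted; infer_instance

-- ===== CLAIM (what is proved, stated in full; the proofs are below) =====
def Claim_equal_move_not_sorted : Prop := ∀ (lst : List Int), Dom_move_not_sorted lst → Spec_move_not_sorted lst (move_not_sorted lst)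

-- ===== LEMMAS AND PROOFS =====

-- A's loop state (kept ++ rest, i = kept.length) computes exactly B's fold over rest.
theorem goA_eq_goB (rest : List Int) : ∀ (kept acc : List Int), kept ≠ [] →
    goA (kept ++ rest) kept.length acc = goB rest kept acc := by
  induction rest with
  | nil =>
    intro kept acc _
    rw [goA]
    simp [goB]
  | cons x rest' ih =>
    intro kept acc hk
    obtain ⟨k, hlast⟩ := List.getLast?_isSome.mpr hk |> Option.isSome_iff_exists.mp
    have hklen : 1 ≤ kept.length := List.length_pos_iff.mpr hk
    rw [goA]
    have hlt : kept.length < (kept ++ x :: rest').length := by simp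
    rw [dif_pos hlt]
    have hprev : (kept ++ x :: rest').getD (kept.length - 1) 0 = k := by
      have h1 : (kept ++ x :: rest')[kept.length - 1]? = kept[kept.length - 1]? :=
        List.getElem?_append_left (by omega)
      have h2 : kept[kept.length - 1]? = some k := by
        rw [← List.getLast?_eq_getElem?]; exact hlast
      simp [List.getD_eq_getElem?_getD, h1, h2]
    have hcur : (kept ++ x :: rest').getD kept.length 0 = x := by
      rw [List.getD_eq_getElem?_getD, List.getElem?_append_right (le_refl _)]
      simp
    rw [hprev, hcur]
    have herase : (kept ++ x :: rest').eraseIdx kept.length = kept ++ rest' := by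
      rw [List.eraseIdx_append]
      simp
    by_cases hgt : k > x
    · rw [if_pos hgt, herase, ih kept (acc ++ [x]) hk]
      simp [goB, hlast, hgt]
    · rw [if_neg hgt]
      have : kept ++ x :: rest' = (kept ++ [x]) ++ rest' := by simp
      rw [this]
      have hlen : kept.length + 1 = (kept ++ [x]).length := by simp
      rw [hlen, ih (kept ++ [x]) acc (by simp)]
      simp [goB, hlast, hgt]

-- ===== VERDICT (by name: the statement is the Claim_ definition above) =====
theorem move_not_sorted_spec : Claim_equal_move_not_sorted := by
  intro lst _
  unfold Spec_move_not_sorted move_not_sorted move_not_sorted_alt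
  cases lst with
  | nil =>
    rw [goA]
    simp [goB]
  | cons a t =>
    have h := goA_eq_goB t [a] [] (by simp)
    simpa [goB] using h
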